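-- pv_equiv track=rewrite | github.com/TrungLee2020/RAG | text_splitter.py | preprocess_markdown_with_placeholder
-- ===== SOURCE A (Python) =====
-- def preprocess_markdown_with_placeholder(text, headers, placeholder="UKN"):
--     """
--     Tiền xử lý văn bản markdown để đảm bảo các header trống có nội dung giữ chỗ
--     """
--     lines = text.splitlines()
--     processed_lines = []
--
--     for i, line in enumerate(lines):
--         processed_lines.append(line)
--
--         # Kiểm tra xem dòng có phải là header không
--         if any(line.startswith(symbol) for symbol, _ in headers):
--             # Nếu là dòng cuối hoặc dòng tiếp theo là header cùng cấp/cao hơn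
--             if i + 1 >= len(lines) or any(
--                     lines[i + 1].startswith(symbol) and len(lines[i + 1].split()[0]) <= len(line.split()[0])
--                     for symbol, _ in headers
--             ):
--                 # Thêm nội dung giữ chỗ
--                 processed_lines.append(placeholder)
--
--     return "\n".join(processed_lines)
-- ===== SOURCE B (Python) =====
-- def preprocess_markdown_with_placeholder(text, headers, placeholder="UKN"):
--     # Right-to-left single pass: walk the lines in reverse carrying the header
--     # level of the line just below (a virtual level-0 header below the end, so
--     # a trailing header always gets the placeholder); no lookahead or indexing.
--     lines = text.splitlines()
--
--     def level(line):
--         if any(line.startswith(sym) for sym, _ in headers):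
--             toks = line.split()
--             return len(toks[0]) if toks else 0
--         return None
--
--     out = []
--     succ = 0  # header level of the line below, None if it is not a header
--     for line in reversed(lines):
--         v = level(line)
--         if v is not None and succ is not None and succ <= v:
--             out.append(placeholder)
--         out.append(line)
--         succ = v
--     out.reverse()
--     return "\n".join(out)
-- ===== Notes on version B (the rewrite author's own statement) =====
-- stated objective: alternative
-- what changed: Replaces A's forward scan with index lookahead (lines[i+1] plus an i+1>=len end test) by a single right-to-left pass that carries the header level of the line just below as fold state (a virtual level-0 header below the end), building the output back-to-front and reversing it; no indexing or lookahead remains.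
import Mathlib
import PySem

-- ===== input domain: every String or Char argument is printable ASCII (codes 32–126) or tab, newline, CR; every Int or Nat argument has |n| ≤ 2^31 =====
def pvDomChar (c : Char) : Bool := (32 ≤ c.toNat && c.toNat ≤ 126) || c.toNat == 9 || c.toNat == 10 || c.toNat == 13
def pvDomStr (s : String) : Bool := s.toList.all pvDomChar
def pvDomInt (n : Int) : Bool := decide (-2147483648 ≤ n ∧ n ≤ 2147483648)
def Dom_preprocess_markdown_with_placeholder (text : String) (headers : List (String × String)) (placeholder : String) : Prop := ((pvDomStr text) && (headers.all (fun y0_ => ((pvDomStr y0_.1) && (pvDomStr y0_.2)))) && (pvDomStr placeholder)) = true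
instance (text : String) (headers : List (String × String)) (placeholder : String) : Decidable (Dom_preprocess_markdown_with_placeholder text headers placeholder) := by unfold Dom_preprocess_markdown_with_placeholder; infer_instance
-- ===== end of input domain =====

-- B replaces A's forward scan with index lookahead by a single right-to-left pass that
-- carries the header level of the line below (objective: alternative traversal, same cost).

-- first-token length: len(line.split()[0]); the [] case (whitespace-only line) is where
-- Python's split()[0] raises IndexError — those inputs are excluded by Pre_ for A, while
-- B's source explicitly writes `len(toks[0]) if toks else 0`.
def pvTokLen (line : String) : Int :=
  match PySem.Str.split₀ line with
  | [] => 0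
  | t :: _ => PySem.Str.len t

-- B's helper `level`: first-token length for header lines, None otherwise
def pvLevel (headers : List (String × String)) (line : String) : Option Int :=
  if headers.any (fun h => PySem.Str.startswith line h.1) then some (pvTokLen line) else none

-- ===== PORT A =====
def preprocess_markdown_with_placeholder (text : String) (headers : List (String × String)) (placeholder : String) : String :=
  let lines := PySem.Str.splitlines text
  let processed_lines : List String :=
    (PySem.List.enumerate lines).foldl (fun acc il =>
      let i := il.1
      let line := il.2
      let acc := acc ++ [line]
      if headers.any (fun h => PySem.Str.startswith line h.1) then
        if decide ((lines.length : Int) ≤ i + 1) ||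
           headers.any (fun h =>
             PySem.Str.startswith (lines.getD (i + 1).toNat "") h.1 &&
             decide (pvTokLen (lines.getD (i + 1).toNat "") ≤ pvTokLen line)) then
          acc ++ [placeholder]
        else acc
      else acc) []
  PySem.Str.join "\n" processed_lines

-- ===== PORT B =====
-- reverse pass; state = (output built back-to-front, level of the line below: `succ`)
def preprocess_markdown_with_placeholder_alt (text : String) (headers : List (String × String)) (placeholder : String) : String :=
  let lines := PySem.Str.splitlines text
  let st := lines.reverse.foldl (fun (st : List String × Option Int) line =>
      let v := pvLevel headers line
      let out :=
        match v, st.2 with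
        | some vv, some ss => if decide (ss ≤ vv) then st.1 ++ [placeholder] else st.1
        | _, _ => st.1
      (out ++ [line], v)) ([], some 0)
  PySem.Str.join "\n" st.1.reverse

-- ===== PRECONDITION & SPEC =====
-- Pre_ excludes exactly the inputs on which A raises IndexError: a header line immediately
-- followed by another header line where either of the two lines has no whitespace token.
def Pre_preprocess_markdown_with_placeholder (text : String) (headers : List (String × String)) (placeholder : String) : Prop :=
  let lines := PySem.Str.splitlines text
  ∀ k < lines.length, k + 1 < lines.length →
    headers.any (fun h => PySem.Str.startswith (lines.getD k "") h.1) = true →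
    headers.any (fun h => PySem.Str.startswith (lines.getD (k + 1) "") h.1) = true →
    PySem.Str.split₀ (lines.getD k "") ≠ [] ∧ PySem.Str.split₀ (lines.getD (k + 1) "") ≠ []
instance (text : String) (headers : List (String × String)) (placeholder : String) : Decidable (Pre_preprocess_markdown_with_placeholder text headers placeholder) := by unfold Pre_preprocess_markdown_with_placeholder; infer_instance

def pvWitness_preprocess_markdown_with_placeholder : String × (List (String × String)) × String :=
  ("# a\nb\n## c", [("#", "h1"), ("##", "h2")], "UKN")

def Spec_preprocess_markdown_with_placeholder (text : String) (headers : List (String × String)) (placeholder : String) (out : String) : Prop := out = preprocess_markdown_with_placeholder_alt text headers placeholder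
instance (text : String) (headers : List (String × String)) (placeholder : String) (out : String) : Decidable (Spec_preprocess_markdown_with_placeholder text headers placeholder out) := by unfold Spec_preprocess_markdown_with_placeholder; infer_instance

-- ===== CLAIM (what is proved, stated in full; the proofs are below) =====
def Claim_equal_preprocess_markdown_with_placeholder : Prop := ∀ (text : String) (headers : List (String × String)) (placeholder : String), Dom_preprocess_markdown_with_placeholder text headers placeholder → Pre_preprocess_markdown_with_placeholder text headers placeholder → Spec_preprocess_markdown_with_placeholder text headers placeholder (preprocess_markdown_with_placeholder text headers placeholder)

-- ===== LEMMAS AND PROOFS =====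

-- common intermediate form: adjacent pairs (line, following line?) and per-pair pieces
def pvAdjTo : List String → Option String → List (String × Option String)
  | [], _ => []
  | x :: xs, t => (x, xs.head?.or t) :: pvAdjTo xs t

def pvCond2 (v s : Option Int) : Bool :=
  match v, s with
  | some vv, some ss => decide (ss ≤ vv)
  | _, _ => false

def pvOlvl (headers : List (String × String)) : Option String → Option Int
  | none => some 0
  | some y => pvLevel headers y

def pvPiece (headers : List (String × String)) (placeholder : String) (p : String × Option String) : List String :=
  p.1 :: (if pvCond2 (pvLevel headers p.1) (pvOlvl headers p.2) then [placeholder] else [])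

def pvGRev (headers : List (String × String)) (placeholder : String) : List String → Option Int → List String
  | [], _ => []
  | x :: xs, s =>
    (if pvCond2 (pvLevel headers x) s then [placeholder] else []) ++ [x]
      ++ pvGRev headers placeholder xs (pvLevel headers x)

theorem pvTokLen_nonneg (line : String) : 0 ≤ pvTokLen line := by
  unfold pvTokLen
  cases PySem.Str.split₀ line with
  | nil => simp
  | cons t _ => simp [PySem.Str.len]

theorem pv_any_and_const {α : Type} (l : List α) (p : α → Bool) (c : Bool) :
    l.any (fun x => p x && c) = (l.any p && c) := by
  induction l with
  | nil => cases c <;> simp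
  | cons a t ih => cases c <;> simp_all

theorem pvAdjTo_snoc (zs : List String) (x : String) (t : Option String) :
    pvAdjTo (zs ++ [x]) t = pvAdjTo zs (some x) ++ [(x, t)] := by
  induction zs with
  | nil => simp [pvAdjTo]
  | cons a zs ih =>
    have hh : (zs ++ [x]).head?.or t = zs.head?.or (some x) := by cases zs <;> simp
    simp [pvAdjTo, ih]

-- A's foldl over the enumerated suffix equals the flatMap of per-pair pieces
theorem pvA_fold (headers : List (String × String)) (placeholder : String) :
    ∀ (suffix pre acc : List String),
    (PySem.List.enumerate suffix (pre.length : Int)).foldl (fun acc il =>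
      let i := il.1
      let line := il.2
      let acc := acc ++ [line]
      if headers.any (fun h => PySem.Str.startswith line h.1) then
        if decide (((pre ++ suffix).length : Int) ≤ i + 1) ||
           headers.any (fun h =>
             PySem.Str.startswith ((pre ++ suffix).getD (i + 1).toNat "") h.1 &&
             decide (pvTokLen ((pre ++ suffix).getD (i + 1).toNat "") ≤ pvTokLen line)) then
          acc ++ [placeholder]
        else acc
      else acc) acc
    = acc ++ (pvAdjTo suffix none).flatMap (pvPiece headers placeholder) := by
  intro suffix
  induction suffix with
  | nil => intro pre acc; simp [PySem.List.enumerate_nil, pvAdjTo]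
  | cons x rest ih =>
    intro pre acc
    rw [PySem.List.enumerate_cons, List.foldl_cons]
    have hstep :
        (let acc := acc ++ [x]
         if headers.any (fun h => PySem.Str.startswith x h.1) then
           if decide (((pre ++ x :: rest).length : Int) ≤ (pre.length : Int) + 1) ||
              headers.any (fun h =>
                PySem.Str.startswith ((pre ++ x :: rest).getD ((pre.length : Int) + 1).toNat "") h.1 &&
                decide (pvTokLen ((pre ++ x :: rest).getD ((pre.length : Int) + 1).toNat "") ≤ pvTokLen x)) then
             acc ++ [placeholder]
           else acc
         else acc)
        = acc ++ pvPiece headers placeholder (x, rest.head?) := by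
      have htn : ((pre.length : Int) + 1).toNat = pre.length + 1 := by omega
      cases rest with
      | nil =>
        have hlen : decide (((pre ++ [x]).length : Int) ≤ (pre.length : Int) + 1) = true := by
          simp
        rw [hlen, Bool.true_or]
        simp only [pvPiece, pvOlvl, pvLevel, pvCond2, List.head?]
        by_cases hh : (headers.any fun h => PySem.Str.startswith x h.1) = true
        · rw [if_pos hh, if_pos hh]
          simp [pvTokLen_nonneg x]
        · rw [if_neg hh, if_neg hh]; simp
      | cons y r =>
        have hlen : decide (((pre ++ x :: y :: r).length : Int) ≤ (pre.length : Int) + 1) = false := by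
          simp
        have hget : (pre ++ x :: y :: r).getD ((pre.length : Int) + 1).toNat "" = y := by
          rw [htn, List.getD_eq_getElem?_getD]
          rw [List.getElem?_append_right (by omega)]
          simp
        rw [hlen, Bool.false_or, hget]
        rw [pv_any_and_const]
        simp only [pvPiece, pvOlvl, pvLevel, pvCond2, List.head?]
        by_cases hh : (headers.any fun h => PySem.Str.startswith x h.1) = true
        · rw [if_pos hh, if_pos hh]
          by_cases hy : (headers.any fun h => PySem.Str.startswith y h.1) = true
          · rw [hy, if_pos rfl]
            simp only [Bool.true_and]
            by_cases hc : (pvTokLen y ≤ pvTokLen x) <;> simp [hc]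
          · rw [Bool.eq_false_iff.mpr hy, if_neg (by simp)]
            simp
        · rw [if_neg hh, if_neg hh]; simp
    rw [hstep]
    have hpre : ((pre.length : Int) + 1) = (((pre ++ [x]).length : Nat) : Int) := by
      simp
    have := ih (pre ++ [x]) (acc ++ pvPiece headers placeholder (x, rest.head?))
    rw [List.append_assoc, List.singleton_append] at this
    rw [hpre, this]
    simp [pvAdjTo, List.flatMap_cons, Option.or_none]

-- B's reverse foldl accumulates pvGRev
theorem pvB_fold (headers : List (String × String)) (placeholder : String) :
    ∀ (ys acc : List String) (s : Option Int),
    (ys.foldl (fun (st : List String × Option Int) line =>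
      let v := pvLevel headers line
      let out :=
        match v, st.2 with
        | some vv, some ss => if decide (ss ≤ vv) then st.1 ++ [placeholder] else st.1
        | _, _ => st.1
      (out ++ [line], v)) (acc, s)).1
    = acc ++ pvGRev headers placeholder ys s := by
  intro ys
  induction ys with
  | nil => intro acc s; simp [pvGRev]
  | cons x xs ih =>
    intro acc s
    rw [List.foldl_cons]
    have hmatch :
        (match pvLevel headers x, s with
         | some vv, some ss => if decide (ss ≤ vv) then acc ++ [placeholder] else acc
         | _, _ => acc)
        = acc ++ (if pvCond2 (pvLevel headers x) s then [placeholder] else []) := by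
      cases pvLevel headers x with
      | none => cases s <;> simp [pvCond2]
      | some vv =>
        cases s with
        | none => simp [pvCond2]
        | some ss =>
          simp only [pvCond2]
          by_cases hc : (ss ≤ vv) <;> simp [hc]
    simp only
    rw [hmatch, ih]
    simp [pvGRev]

-- reversing pvGRev over the reversed lines yields the flatMap of per-pair pieces
theorem pvGRev_reverse (headers : List (String × String)) (placeholder : String) :
    ∀ (ys : List String) (t : Option String),
    (pvGRev headers placeholder ys (pvOlvl headers t)).reverse
      = (pvAdjTo ys.reverse t).flatMap (pvPiece headers placeholder) := by
  intro ys
  induction ys with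
  | nil => intro t; simp [pvGRev, pvAdjTo]
  | cons x xs ih =>
    intro t
    have hx : pvLevel headers x = pvOlvl headers (some x) := rfl
    simp only [pvGRev, List.reverse_append]
    rw [hx, ih (some x)]
    simp only [List.reverse_cons]
    rw [pvAdjTo_snoc, List.flatMap_append]
    simp only [List.flatMap_cons, List.flatMap_nil, List.append_nil]
    by_cases hc : pvCond2 (pvOlvl headers (some x)) (pvOlvl headers t) = true <;>
      simp [pvPiece, hx, hc]

theorem preprocess_markdown_equal : ∀ (text : String) (headers : List (String × String)) (placeholder : String),
    preprocess_markdown_with_placeholder text headers placeholder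
      = preprocess_markdown_with_placeholder_alt text headers placeholder := by
  intro text headers placeholder
  unfold preprocess_markdown_with_placeholder preprocess_markdown_with_placeholder_alt
  dsimp only
  generalize PySem.Str.splitlines text = lines
  rw [pvB_fold headers placeholder lines.reverse [] (some 0)]
  refine congrArg (PySem.Str.join "\n") ?_
  refine Eq.trans (pvA_fold headers placeholder lines [] []) ?_
  rw [List.nil_append, List.nil_append]
  rw [show (some 0 : Option Int) = pvOlvl headers none from rfl]
  rw [pvGRev_reverse headers placeholder lines.reverse none, List.reverse_reverse]

-- ===== VERDICT (by name: the statement is the Claim_ definition above) =====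
theorem preprocess_markdown_with_placeholder_spec : Claim_equal_preprocess_markdown_with_placeholder := by
  intro text headers placeholder _ _
  unfold Spec_preprocess_markdown_with_placeholder
  exact preprocess_markdown_equal text headers placeholder
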